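-- pv_equiv track=rewrite | github.com/uqchenxi/Traffic-Flow-Prediction-Flask-App | project/linear_regression.py | get_time_period
-- ===== SOURCE A (Python) =====
-- NUMLIST = [str(i) for i in range(10)]
--
-- def get_time_period(time_str):
--     status = False
--     s_num = ''
--
--     for i, num in enumerate(time_str):
--         if num == ' ':
--             status = True
--
--         if status == True:
--             if num in NUMLIST:
--                 s_num += num
--
--         if len(s_num) == 4:
--             status = False
--
--     return s_num
-- ===== SOURCE B (Python) =====
-- def get_time_period(time_str):
--     _, sep, rest = time_str.partition(' ')
--     if not sep:
--         return ''
--     digits = [c for c in rest if c in '0123456789']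
--     return ''.join(digits)[:4]
-- ===== Notes on version B (the rewrite author's own statement) =====
-- stated objective: simpler
-- what changed: Replaced the single-pass stateful flag machine over every character with a locate-then-filter-then-slice decomposition: partition at the first space, keep the digit characters of the tail, take the first four.
import Mathlib
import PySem

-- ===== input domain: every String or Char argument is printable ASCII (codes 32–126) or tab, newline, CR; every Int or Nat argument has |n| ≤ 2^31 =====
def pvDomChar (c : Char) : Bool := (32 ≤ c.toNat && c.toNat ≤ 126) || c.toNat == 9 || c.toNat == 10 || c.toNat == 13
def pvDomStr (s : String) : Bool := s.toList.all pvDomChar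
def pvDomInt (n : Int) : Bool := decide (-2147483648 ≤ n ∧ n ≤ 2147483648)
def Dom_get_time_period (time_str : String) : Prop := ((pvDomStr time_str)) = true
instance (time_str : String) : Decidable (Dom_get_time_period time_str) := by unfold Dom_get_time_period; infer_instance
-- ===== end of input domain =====

-- B replaces A's single-pass stateful flag machine by partition-at-first-space,
-- filter digits, take four — a simpler decomposition, same return value on all inputs.


-- ===== PORT A =====
-- NUMLIST = [str(i) for i in range(10)]
def pvNUMLIST : List String := (PySem.List.pyRange 0 10 1).map PySem.Int.toStr

-- A's loop body (the enumerate index i is unused by the body and is dropped)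
def pvStepA (st : Bool × List Char) (num : Char) : Bool × List Char :=
  let status := if num = ' ' then true else st.1
  let s_num := if status = true then
                 (if String.ofList [num] ∈ pvNUMLIST then st.2 ++ [num] else st.2)
               else st.2
  let status := if s_num.length = 4 then false else status
  (status, s_num)

def get_time_period (time_str : String) : String :=
  String.ofList ((time_str.toList.foldl pvStepA (false, [])).2)

-- ===== PORT B =====
-- str.partition(' ') ported by hand (no PySem primitive): exact for a single-char separator
def pvPartitionSpace (s : List Char) : List Char × List Char × List Char :=
  if ' ' ∈ s then (s.takeWhile (· ≠ ' '), [' '], (s.dropWhile (· ≠ ' ')).tail)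
  else (s, [], [])

def get_time_period_alt (time_str : String) : String :=
  let p := pvPartitionSpace time_str.toList
  if p.2.1 = [] then ""
  else
    let digits := p.2.2.filter (fun c => c ∈ "0123456789".toList)
    String.ofList (PySem.List.slice digits none (some 4))

-- ===== PRECONDITION & SPEC =====
def Spec_get_time_period (time_str : String) (out : String) : Prop := out = get_time_period_alt time_str
instance (time_str : String) (out : String) : Decidable (Spec_get_time_period time_str out) := by unfold Spec_get_time_period; infer_instance

-- ===== CLAIM (what is proved, stated in full; the proofs are below) =====
def Claim_equal_get_time_period : Prop := ∀ (time_str : String), Dom_get_time_period time_str → Spec_get_time_period time_str (get_time_period time_str)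

-- ===== LEMMAS AND PROOFS =====

theorem pvMem_numlist (c : Char) :
    (String.ofList [c] ∈ pvNUMLIST) ↔ c ∈ "0123456789".toList := by
  have h2 : pvNUMLIST = ['0','1','2','3','4','5','6','7','8','9'].map (fun d => String.ofList [d]) := by decide
  have h3 : "0123456789".toList = ['0','1','2','3','4','5','6','7','8','9'] := by decide
  rw [h2, h3, List.mem_map]
  constructor
  · rintro ⟨d, hd, he⟩
    have hdc : [d] = [c] := by have := congrArg String.toList he; simpa using this
    simpa [← List.singleton_inj.mp hdc] using hd
  · intro hc; exact ⟨c, hc, rfl⟩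

theorem pvSlice4 (xs : List Char) : PySem.List.slice xs none (some 4) = xs.take 4 := by
  have h := PySem.List.slice_to_natCast xs 4
  simpa using h

-- collecting-phase invariant: the status flag equals (s_num.length ≠ 4)
theorem pvCollect (l : List Char) (s : List Char) (h : s.length ≤ 4) :
    l.foldl pvStepA (decide (s.length ≠ 4), s) =
      (decide ((s ++ (l.filter (fun c => c ∈ "0123456789".toList)).take (4 - s.length)).length ≠ 4),
       s ++ (l.filter (fun c => c ∈ "0123456789".toList)).take (4 - s.length)) := by
  induction l generalizing s with
  | nil => simp
  | cons c l ih =>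
    rw [List.foldl_cons]
    by_cases h4 : s.length = 4
    · have hstep : pvStepA (decide (s.length ≠ 4), s) c = (decide (s.length ≠ 4), s) := by
        by_cases hsp : c = ' '
        · subst hsp
          have hns : String.ofList [' '] ∉ pvNUMLIST := by decide
          simp [pvStepA, h4, hns]
        · simp [pvStepA, h4, hsp]
      rw [hstep, ih s h]
      have h0 : 4 - s.length = 0 := by omega
      simp [h0, List.filter_cons]
    · have htrue : decide (s.length ≠ 4) = true := by simp [h4]
      by_cases hd : c ∈ "0123456789".toList
      · have hstep : pvStepA (decide (s.length ≠ 4), s) c =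
            (decide ((s ++ [c]).length ≠ 4), s ++ [c]) := by
          have hsp : c ≠ ' ' := by rintro rfl; simp at hd
          have hmem : String.ofList [c] ∈ pvNUMLIST := (pvMem_numlist c).mpr hd
          simp [pvStepA, htrue, hsp, hmem]
        rw [hstep, ih (s ++ [c]) (by simp; omega)]
        obtain ⟨k, hk⟩ : ∃ k, 4 - s.length = k + 1 := ⟨4 - s.length - 1, by omega⟩
        have hk' : 4 - (s ++ [c]).length = k := by simp; omega
        have hpc : (decide (c ∈ "0123456789".toList)) = true := by simpa using hd
        rw [List.filter_cons]
        simp only [hpc, if_true, hk, hk', List.take_succ_cons]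
        rw [← List.append_cons]
      · have hstep : pvStepA (decide (s.length ≠ 4), s) c = (decide (s.length ≠ 4), s) := by
          have hnm : String.ofList [c] ∉ pvNUMLIST := fun hm => hd ((pvMem_numlist c).mp hm)
          simp [pvStepA, hnm, h4]
        rw [hstep, ih s h]
        have hpc : (decide (c ∈ "0123456789".toList)) = false := by simpa using hd
        rw [List.filter_cons]
        simp only [hpc, Bool.false_eq_true, if_false]

-- before the first space nothing is collected and the flag stays off
theorem pvPrespace (l : List Char) :
    l.foldl pvStepA (false, []) =
      (if ' ' ∈ l then ((l.dropWhile (· ≠ ' ')).tail.foldl pvStepA (true, [])) else (false, [])) := by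
  induction l with
  | nil => simp
  | cons c l ih =>
    by_cases hsp : c = ' '
    · subst hsp
      have hstep : pvStepA (false, []) ' ' = (true, []) := by decide
      simp [List.foldl_cons, hstep]
    · have hstep : pvStepA (false, []) c = (false, []) := by simp [pvStepA, hsp]
      have hsp' : ¬(' ' = c) := fun h => hsp h.symm
      simp [List.foldl_cons, hstep, ih, hsp']
      rw [List.dropWhile_cons_of_pos (by simp [hsp])]

-- ===== VERDICT (by name: the statement is the Claim_ definition above) =====
theorem get_time_period_spec : Claim_equal_get_time_period := by
  intro s _
  unfold Spec_get_time_period get_time_period get_time_period_alt pvPartitionSpace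
  by_cases hsp : ' ' ∈ s.toList
  · have h0 : (true, ([] : List Char)) = (decide (([] : List Char).length ≠ 4), []) := by decide
    rw [pvPrespace, if_pos hsp, if_pos hsp, h0,
      pvCollect ((s.toList.dropWhile (· ≠ ' ')).tail) [] (by simp)]
    simp [pvSlice4]
  · rw [pvPrespace, if_neg hsp, if_neg hsp]
    simp
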